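-- pv_equiv track=rewrite | github.com/amcw7777/python-exercises | cs177/project3/project3.py | buildPointsTable
-- ===== SOURCE A (Python) =====
-- def buildPointsTable(teams, results):
--     # print ('Remove this print statement while start coding this function')
--     pointsTable = {}
--     for team in teams:
--         pointsTable[team] = 0
--     for line in results:
--         gameResult = line.split(', ') # the space is needed
--         if gameResult[2]>gameResult[3]:
--             pointsTable[gameResult[0]] += 3
--             pointsTable[gameResult[1]] += 0
--         if gameResult[2]==gameResult[3]:
--             pointsTable[gameResult[0]] += 1
--             pointsTable[gameResult[1]] += 1
--         if gameResult[2]<gameResult[3]: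
--             pointsTable[gameResult[0]] += 0
--             pointsTable[gameResult[1]] += 3
--     return pointsTable.items()
-- ===== SOURCE B (Python) =====
-- def buildPointsTable(teams, results):
--     pointsTable = {}
--     for team in teams:
--         pointsTable[team] = 0
--     for team in pointsTable:
--         total = 0
--         for line in results:
--             gameResult = line.split(', ')
--             if team == gameResult[0]:
--                 if gameResult[2] > gameResult[3]:
--                     total += 3
--                 elif gameResult[2] == gameResult[3]:
--                     total += 1
--             if team == gameResult[1]:
--                 if gameResult[3] > gameResult[2]:
--                     total += 3
--                 elif gameResult[2] == gameResult[3]: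
--                     total += 1
--         pointsTable[team] = total
--     return pointsTable.items()
-- ===== Notes on version B (the rewrite author's own statement) =====
-- stated objective: alternative
-- what changed: A makes one combined pass over results updating three dict entries per line; B initialises the table and then, for each team, independently rescans all result lines accumulating that team's total before writing it once.
import Mathlib
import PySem

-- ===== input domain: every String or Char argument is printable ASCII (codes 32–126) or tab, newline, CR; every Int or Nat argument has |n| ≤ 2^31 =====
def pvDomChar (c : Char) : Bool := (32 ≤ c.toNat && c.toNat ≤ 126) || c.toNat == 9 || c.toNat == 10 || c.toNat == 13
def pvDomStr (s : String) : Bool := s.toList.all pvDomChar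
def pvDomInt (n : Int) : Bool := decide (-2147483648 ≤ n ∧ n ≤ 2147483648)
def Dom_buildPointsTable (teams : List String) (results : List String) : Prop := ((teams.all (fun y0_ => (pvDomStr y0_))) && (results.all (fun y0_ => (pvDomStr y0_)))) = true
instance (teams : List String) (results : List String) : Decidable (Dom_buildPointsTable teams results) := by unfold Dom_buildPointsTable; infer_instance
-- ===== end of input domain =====

-- B replaces A's single combined pass over results (with three dict updates per line) by a
-- per-team rescan of the result lines, accumulating each team's total independently ('alternative',
-- not faster). Return-value equivalence only; neither version mutates its arguments.

-- ===== PORT A =====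
-- line.split(', ') — the separator is nonempty, so split? is always `some`;
-- Python's str comparison is code-point lexicographic = Lean's `<`/`=` on .toList (PySem)
def pvFields (line : String) : List String := (PySem.Str.split? line ", ").getD []

-- the shared initialisation loop: pointsTable = {}; for team in teams: pointsTable[team] = 0
def pvInit (teams : List String) : PySem.Dict String Int :=
  teams.foldl (fun d team => d.insert team 0) PySem.Dict.empty

-- body of A's `for line in results` loop; `pointsTable[k] += n` is modify k 0 (· + n):
-- the default 0 is never consulted under Pre_ (Python raises KeyError exactly there)
def pvStepA (d : PySem.Dict String Int) (line : String) : PySem.Dict String Int :=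
  let g := pvFields line
  let d := if (g.getD 2 "").toList > (g.getD 3 "").toList then
      (d.modify (g.getD 0 "") 0 (· + 3)).modify (g.getD 1 "") 0 (· + 0) else d
  let d := if (g.getD 2 "").toList = (g.getD 3 "").toList then
      (d.modify (g.getD 0 "") 0 (· + 1)).modify (g.getD 1 "") 0 (· + 1) else d
  let d := if (g.getD 2 "").toList < (g.getD 3 "").toList then
      (d.modify (g.getD 0 "") 0 (· + 0)).modify (g.getD 1 "") 0 (· + 3) else d
  d

def buildPointsTable (teams : List String) (results : List String) : List (String × Int) :=
  (results.foldl pvStepA (pvInit teams)).items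

-- ===== PORT B =====
-- points `team` gains from one result line (the body of B's inner loop)
def pvGamePoints (team : String) (tot : Int) (line : String) : Int :=
  let g := pvFields line
  let tot := if team = g.getD 0 "" then
      (if (g.getD 2 "").toList > (g.getD 3 "").toList then tot + 3
       else if (g.getD 2 "").toList = (g.getD 3 "").toList then tot + 1 else tot) else tot
  let tot := if team = g.getD 1 "" then
      (if (g.getD 3 "").toList > (g.getD 2 "").toList then tot + 3
       else if (g.getD 2 "").toList = (g.getD 3 "").toList then tot + 1 else tot) else tot
  tot

def buildPointsTable_alt (teams : List String) (results : List String) : List (String × Int) :=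
  let pt0 := pvInit teams
  (pt0.keys.foldl (fun d team => d.insert team (results.foldl (pvGamePoints team) 0)) pt0).items

-- ===== PRECONDITION & SPEC =====
-- Pre_ excludes exactly the inputs on which A raises: a line with fewer than 4 ', '-separated
-- fields (IndexError) or whose home/away team is not in `teams` (KeyError).
def Pre_buildPointsTable (teams : List String) (results : List String) : Prop :=
  ∀ line ∈ results, 4 ≤ (pvFields line).length ∧
    (pvFields line).getD 0 "" ∈ teams ∧ (pvFields line).getD 1 "" ∈ teams
instance (teams : List String) (results : List String) : Decidable (Pre_buildPointsTable teams results) := by unfold Pre_buildPointsTable; infer_instance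

def pvWitness_buildPointsTable : List String × List String :=
  (["a", "b"], ["a, b, 2, 1", "b, a, 1, 1"])

def Spec_buildPointsTable (teams : List String) (results : List String) (out : List (String × Int)) : Prop := out = buildPointsTable_alt teams results
instance (teams : List String) (results : List String) (out : List (String × Int)) : Decidable (Spec_buildPointsTable teams results out) := by unfold Spec_buildPointsTable; infer_instance

-- ===== CLAIM (what is proved, stated in full; the proofs are below) =====
def Claim_equal_buildPointsTable : Prop := ∀ (teams : List String) (results : List String), Dom_buildPointsTable teams results → Pre_buildPointsTable teams results → Spec_buildPointsTable teams results (buildPointsTable teams results)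

-- ===== LEMMAS AND PROOFS =====

-- B's insert loop with a dict-independent value, read back through getD
lemma pv_getD_foldl_insert (G : String → Int) (l : List String) (d : PySem.Dict String Int)
    (j : String) :
    (l.foldl (fun d k => d.insert k (G k)) d).getD j 0 = if j ∈ l then G j else d.getD j 0 := by
  induction l generalizing d with
  | nil => simp
  | cons k l ih =>
      simp only [List.foldl_cons, ih, PySem.Dict.getD_insert, List.mem_cons]
      by_cases hl : j ∈ l <;> by_cases hk : j = k <;> simp [hl, hk]

lemma pvInit_getD (teams : List String) (j : String) : (pvInit teams).getD j 0 = 0 := by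
  unfold pvInit
  rw [pv_getD_foldl_insert (fun _ => 0) teams PySem.Dict.empty j]
  simp [PySem.Dict.getD_empty]

lemma pvInit_keys_nodup (teams : List String) : (pvInit teams).keys.Nodup := by
  unfold pvInit
  exact PySem.Dict.nodup_keys_foldl_insert teams _ _ (by simp [PySem.Dict.keys_empty])

lemma pv_mem_pvInit_keys (teams : List String) (j : String) :
    j ∈ (pvInit teams).keys ↔ j ∈ teams := by
  unfold pvInit
  rw [PySem.Dict.keys_foldl_insert]
  simp [PySem.Set.mem_update, PySem.Dict.keys_empty]

lemma pv_set_update_of_subset (s : PySem.Set String) (xs : List String)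
    (h : ∀ x ∈ xs, x ∈ s) : PySem.Set.update s xs = s := by
  induction xs generalizing s with
  | nil => rfl
  | cons x xs ih =>
      have hx : x ∈ s := h x (by simp)
      have hadd : PySem.Set.add s x = s := by
        simp [PySem.Set.add, PySem.Set.contains, hx]
      show PySem.Set.update (PySem.Set.add s x) xs = s
      rw [hadd]
      exact ih s (fun y hy => h y (by simp [hy]))

-- one line of A's loop changes team j's score exactly as pvGamePoints does
lemma pv_getD_stepA (d : PySem.Dict String Int) (line : String) (j : String) :
    (pvStepA d line).getD j 0 = pvGamePoints j (d.getD j 0) line := by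
  unfold pvStepA pvGamePoints
  rcases lt_trichotomy ((pvFields line).getD 2 "").toList ((pvFields line).getD 3 "").toList with h | h | h
  · simp only [gt_iff_lt, if_neg (lt_asymm h), if_neg (ne_of_lt h), if_pos h,
      PySem.Dict.getD_modify]
    split_ifs <;> simp_all
  · simp only [gt_iff_lt, h, lt_irrefl, if_false, if_true,
      PySem.Dict.getD_modify]
    split_ifs <;> simp_all
  · simp only [gt_iff_lt, if_pos h, if_neg (ne_of_lt h).symm, if_neg (lt_asymm h),
      PySem.Dict.getD_modify]
    split_ifs <;> simp_all

lemma pv_keys_modify2 (d : PySem.Dict String Int) (a b : String) (f g : Int → Int)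
    (ha : a ∈ d.keys) (hb : b ∈ d.keys) :
    ((d.modify a 0 f).modify b 0 g).keys = d.keys := by
  have h1 : (d.modify a 0 f).keys = d.keys := by
    rw [PySem.Dict.keys_modify]
    exact PySem.Dict.keys_insert_of_contains _ _ ((PySem.Dict.contains_iff_mem_keys d a).mpr ha)
  rw [PySem.Dict.keys_modify,
      PySem.Dict.keys_insert_of_contains _ _
        ((PySem.Dict.contains_iff_mem_keys _ b).mpr (h1 ▸ hb))]
  exact h1

lemma pv_keys_stepA (d : PySem.Dict String Int) (line : String)
    (h0 : (pvFields line).getD 0 "" ∈ d.keys) (h1 : (pvFields line).getD 1 "" ∈ d.keys) :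
    (pvStepA d line).keys = d.keys := by
  simp only [pvStepA]
  rcases lt_trichotomy ((pvFields line).getD 2 "").toList ((pvFields line).getD 3 "").toList with h | h | h
  · simp only [gt_iff_lt, if_neg (lt_asymm h), if_neg (ne_of_lt h), if_pos h]
    exact pv_keys_modify2 d _ _ _ _ h0 h1
  · simp only [gt_iff_lt, h, lt_irrefl, if_false, if_true]
    exact pv_keys_modify2 d _ _ _ _ h0 h1
  · simp only [gt_iff_lt, if_pos h, if_neg (ne_of_lt h).symm, if_neg (lt_asymm h)]
    exact pv_keys_modify2 d _ _ _ _ h0 h1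

lemma pv_getD_foldA (results : List String) (d : PySem.Dict String Int) (j : String) :
    (results.foldl pvStepA d).getD j 0 = results.foldl (pvGamePoints j) (d.getD j 0) := by
  induction results generalizing d with
  | nil => rfl
  | cons line rest ih =>
      simp only [List.foldl_cons, ih, pv_getD_stepA]

lemma pv_keys_foldA (results : List String) (d : PySem.Dict String Int)
    (h : ∀ line ∈ results, (pvFields line).getD 0 "" ∈ d.keys ∧ (pvFields line).getD 1 "" ∈ d.keys) :
    (results.foldl pvStepA d).keys = d.keys := by
  induction results generalizing d with
  | nil => rfl
  | cons line rest ih =>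
      have h0 := (h line (by simp)).1
      have h1 := (h line (by simp)).2
      have hs := pv_keys_stepA d line h0 h1
      simp only [List.foldl_cons]
      rw [ih (pvStepA d line) (by intro l hl; rw [hs]; exact h l (by simp [hl])), hs]

-- ===== VERDICT (by name: the statement is the Claim_ definition above) =====
theorem buildPointsTable_spec : Claim_equal_buildPointsTable := by
  intro teams results _ hpre
  unfold Spec_buildPointsTable buildPointsTable buildPointsTable_alt
  have hmem : ∀ line ∈ results,
      (pvFields line).getD 0 "" ∈ (pvInit teams).keys ∧ (pvFields line).getD 1 "" ∈ (pvInit teams).keys := by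
    intro line hl
    exact ⟨(pv_mem_pvInit_keys teams _).mpr (hpre line hl).2.1,
           (pv_mem_pvInit_keys teams _).mpr (hpre line hl).2.2⟩
  have hkA : (results.foldl pvStepA (pvInit teams)).keys = (pvInit teams).keys :=
    pv_keys_foldA results (pvInit teams) hmem
  have hkB : ((pvInit teams).keys.foldl
      (fun d team => d.insert team (results.foldl (pvGamePoints team) 0)) (pvInit teams)).keys
      = (pvInit teams).keys := by
    rw [PySem.Dict.keys_foldl_insert]
    exact pv_set_update_of_subset _ _ (fun x hx => hx)
  have hnd : (pvInit teams).keys.Nodup := pvInit_keys_nodup teams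
  rw [PySem.Dict.items_eq_map_keys _ (by rw [hkA]; exact hnd) 0,
      PySem.Dict.items_eq_map_keys _ (by rw [hkB]; exact hnd) 0, hkA, hkB]
  apply List.map_congr_left
  intro k hk
  rw [pv_getD_foldA, pvInit_getD,
      pv_getD_foldl_insert (fun team => results.foldl (pvGamePoints team) 0) _ _ k]
  simp [hk]
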